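-- pv_equiv track=rewrite | github.com/Chandan-14r/FidelityNurture | fidelity_nurture/ai/predictor.py | _suggest_mitigations
-- ===== SOURCE A (Python) =====
-- def _suggest_mitigations(risk_level: str, factors: list[str]) -> list[str]:
--     """Suggest risk mitigation strategies."""
--     mitigations = []
--
--     if risk_level in ("HIGH", "CRITICAL"):
--         mitigations.append("🎯 Set stop-loss orders on individual positions (10-15% below cost)")
--         mitigations.append("📊 Rebalance portfolio to reduce concentration")
--
--     if any("Technology" in f for f in factors):
--         mitigations.append("🔀 Diversify tech exposure across healthcare, utilities, and consumer staples")
--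
--     if any("Single stock" in f for f in factors):
--         mitigations.append("✂️ Trim largest positions to under 10% each")
--
--     if any("bond" in f.lower() for f in factors):
--         mitigations.append("🛡️ Add 15-20% bonds or treasury ETFs for stability")
--
--     if any("diversification" in f.lower() for f in factors):
--         mitigations.append("🌐 Add 3-5 more holdings across different sectors")
--
--     if not mitigations:
--         mitigations.append("✅ Portfolio risk is well-managed — continue monitoring")
--
--     return mitigations
-- ===== SOURCE B (Python) =====
-- # Table-driven re-implementation: a rule table of (keyword, case-insensitive?, message)
-- # and a matched-keyword set built in one nested pass; messages are emitted by
-- # filtering the table against the matched set.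
-- _RULES = [
--     ("Technology", False, "\U0001F500 Diversify tech exposure across healthcare, utilities, and consumer staples"),
--     ("Single stock", False, "\u2702\uFE0F Trim largest positions to under 10% each"),
--     ("bond", True, "\U0001F6E1\uFE0F Add 15-20% bonds or treasury ETFs for stability"),
--     ("diversification", True, "\U0001F310 Add 3-5 more holdings across different sectors"),
-- ]
--
--
-- def _suggest_mitigations(risk_level: str, factors: list[str]) -> list[str]:
--     """Suggest risk mitigation strategies (rule-table driven)."""
--     hit = set()
--     for f in factors:
--         fl = f.lower()
--         for kw, ci, _ in _RULES:
--             if kw in (fl if ci else f):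
--                 hit.add(kw)
--
--     out = []
--     if risk_level in ("HIGH", "CRITICAL"):
--         out.append("\U0001F3AF Set stop-loss orders on individual positions (10-15% below cost)")
--         out.append("\U0001F4CA Rebalance portfolio to reduce concentration")
--     out.extend(msg for kw, _, msg in _RULES if kw in hit)
--     return out or ["\u2705 Portfolio risk is well-managed \u2014 continue monitoring"]
-- ===== Notes on version B (the rewrite author's own statement) =====
-- stated objective: alternative
-- what changed: B is a data-driven rule engine: the four hard-coded substring branches become a rule table (keyword, case-insensitive flag, message); one nested pass over factors x rules collects a matched-keyword set, and the output is the table filtered by that set, so A's if-chain of any() scans disappears.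
import Mathlib
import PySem

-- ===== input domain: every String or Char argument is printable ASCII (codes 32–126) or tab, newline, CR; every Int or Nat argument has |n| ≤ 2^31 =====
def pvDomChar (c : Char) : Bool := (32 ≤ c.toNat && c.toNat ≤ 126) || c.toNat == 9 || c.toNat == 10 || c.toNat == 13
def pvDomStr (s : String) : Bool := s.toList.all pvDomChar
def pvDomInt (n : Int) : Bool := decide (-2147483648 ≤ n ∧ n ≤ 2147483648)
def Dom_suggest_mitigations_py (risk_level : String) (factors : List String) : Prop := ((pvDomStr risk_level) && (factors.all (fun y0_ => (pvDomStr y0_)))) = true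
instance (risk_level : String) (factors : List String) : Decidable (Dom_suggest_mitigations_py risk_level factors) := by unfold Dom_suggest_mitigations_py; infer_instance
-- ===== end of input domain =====

-- B replaces A's hard-coded if-chain of any() scans by a rule table filtered through a matched-keyword set (objective: alternative decomposition).

-- ===== PORT A =====
-- Port of A: builds the list with four independent any(...) scans over factors.
def suggest_mitigations_py (risk_level : String) (factors : List String) : List String :=
  let m : List String := []
  let m := if risk_level = "HIGH" ∨ risk_level = "CRITICAL" then
      m ++ ["🎯 Set stop-loss orders on individual positions (10-15% below cost)",
            "📊 Rebalance portfolio to reduce concentration"] else m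
  let m := if factors.any (fun f => PySem.Str.isIn "Technology" f) then
      m ++ ["🔀 Diversify tech exposure across healthcare, utilities, and consumer staples"] else m
  let m := if factors.any (fun f => PySem.Str.isIn "Single stock" f) then
      m ++ ["✂️ Trim largest positions to under 10% each"] else m
  let m := if factors.any (fun f => PySem.Str.isIn "bond" (PySem.Str.lower f)) then
      m ++ ["🛡️ Add 15-20% bonds or treasury ETFs for stability"] else m
  let m := if factors.any (fun f => PySem.Str.isIn "diversification" (PySem.Str.lower f)) then
      m ++ ["🌐 Add 3-5 more holdings across different sectors"] else m
  let m := if m = [] then m ++ ["✅ Portfolio risk is well-managed — continue monitoring"] else m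
  m

-- ===== PORT B =====
-- B's rule table: (keyword, case-insensitive?, message).
def pvRules : List (String × Bool × String) :=
  [("Technology", false, "🔀 Diversify tech exposure across healthcare, utilities, and consumer staples"),
   ("Single stock", false, "✂️ Trim largest positions to under 10% each"),
   ("bond", true, "🛡️ Add 15-20% bonds or treasury ETFs for stability"),
   ("diversification", true, "🌐 Add 3-5 more holdings across different sectors")]

-- inner loop of B: try every rule against one factor, adding matched keywords to the set
def pvStep (s : PySem.Set String) (f : String) : PySem.Set String :=
  let fl := PySem.Str.lower f
  pvRules.foldl (fun s r => if PySem.Str.isIn r.1 (if r.2.1 then fl else f) then PySem.Set.add s r.1 else s) s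

-- Port of B: matched-keyword set built in one nested pass, then the table filtered by it.
def suggest_mitigations_py_alt (risk_level : String) (factors : List String) : List String :=
  let hit : PySem.Set String := factors.foldl pvStep PySem.Set.empty
  let out : List String := if risk_level = "HIGH" ∨ risk_level = "CRITICAL" then
      ["🎯 Set stop-loss orders on individual positions (10-15% below cost)",
       "📊 Rebalance portfolio to reduce concentration"] else []
  let out := out ++ pvRules.filterMap (fun r => if PySem.Set.contains hit r.1 then some r.2.2 else none)
  if out = [] then ["✅ Portfolio risk is well-managed — continue monitoring"] else out

-- ===== PRECONDITION & SPEC =====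
def Spec_suggest_mitigations_py (risk_level : String) (factors : List String) (out : List String) : Prop := out = suggest_mitigations_py_alt risk_level factors
instance (risk_level : String) (factors : List String) (out : List String) : Decidable (Spec_suggest_mitigations_py risk_level factors out) := by unfold Spec_suggest_mitigations_py; infer_instance

-- ===== CLAIM =====
def Claim_equal_suggest_mitigations_py : Prop := ∀ (risk_level : String) (factors : List String), Dom_suggest_mitigations_py risk_level factors → Spec_suggest_mitigations_py risk_level factors (suggest_mitigations_py risk_level factors)

-- ===== LEMMAS AND PROOFS =====

-- the matched-keyword set contains kw iff some factor matches, given how one step treats kw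
theorem contains_hit_fold (factors : List String) (kw : String) (pred : String → Bool)
    (h : ∀ (s : PySem.Set String) (f : String), kw ∈ pvStep s f ↔ kw ∈ s ∨ pred f = true) :
    PySem.Set.contains (factors.foldl pvStep PySem.Set.empty) kw = factors.any pred := by
  have main : ∀ s : PySem.Set String,
      kw ∈ factors.foldl pvStep s ↔ kw ∈ s ∨ factors.any pred = true := by
    induction factors with
    | nil => simp
    | cons x xs ih =>
      intro s
      rw [List.foldl_cons, ih, h]
      simp only [List.any_cons, Bool.or_eq_true]
      tauto
  have h3 : kw ∈ List.foldl pvStep PySem.Set.empty factors ↔ factors.any pred = true := by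
    rw [main PySem.Set.empty]; simp [PySem.Set.empty]
  cases hb : factors.any pred with
  | true =>
    simp only [PySem.Set.contains_iff]
    exact h3.mpr hb
  | false =>
    simp only [Bool.eq_false_iff, ne_eq, PySem.Set.contains_iff]
    intro hmem
    rw [hb] at h3
    exact Bool.false_ne_true (h3.mp hmem)

-- ===== VERDICT =====
set_option maxHeartbeats 1000000 in
theorem suggest_mitigations_py_spec : Claim_equal_suggest_mitigations_py := by
  intro risk_level factors _
  unfold Spec_suggest_mitigations_py suggest_mitigations_py suggest_mitigations_py_alt
  have ht := contains_hit_fold factors "Technology" (fun f => PySem.Str.isIn "Technology" f)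
    (by intro s f; simp [pvStep, pvRules]; split_ifs <;> simp_all)
  have hs := contains_hit_fold factors "Single stock" (fun f => PySem.Str.isIn "Single stock" f)
    (by intro s f; simp [pvStep, pvRules]; split_ifs <;> simp_all)
  have hbd := contains_hit_fold factors "bond" (fun f => PySem.Str.isIn "bond" (PySem.Str.lower f))
    (by intro s f; simp [pvStep, pvRules]; split_ifs <;> simp_all)
  have hdv := contains_hit_fold factors "diversification" (fun f => PySem.Str.isIn "diversification" (PySem.Str.lower f))
    (by intro s f; simp [pvStep, pvRules]; split_ifs <;> simp_all)
  simp only [pvRules, List.filterMap_cons, List.filterMap_nil, ht, hs, hbd, hdv]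
  split_ifs <;> simp_all
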